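-- pv_equiv track=rewrite | github.com/Nellur35/taintly | taintly/parsers/structural/tokenizer.py | _read_quoted_scalar
-- ===== SOURCE A (Python) =====
-- class TokenizerError(Exception):
--     """Recoverable tokenization error.
--
--     Raised when the input contains a YAML feature this tokenizer
--     intentionally doesn't support.  The caller should catch and
--     degrade gracefully — emit a CUTOFF event from the walker, or
--     fall back to regex-based scanning of this file.
--     """
--
--     def __init__(self, line: int, message: str) -> None:
--         super().__init__(f"line {line}: {message}")
--         self.line = line
--
-- def _read_quoted_scalar(
--     raw: str, start: int, line_no: int
-- ) -> tuple[int, str]: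
--     quote = raw[start]
--     pos = start + 1
--     n = len(raw)
--     out: list[str] = []
--     while pos < n:
--         ch = raw[pos]
--         if quote == "'":
--             # Single quote — only escape is doubled ``''``.
--             if ch == "'":
--                 if pos + 1 < n and raw[pos + 1] == "'":
--                     out.append("'")
--                     pos += 2
--                     continue
--                 return pos + 1, "".join(out)
--             out.append(ch)
--             pos += 1
--             continue
--         # Double quote — backslash escapes (decoding still
--         # leaves them as raw text; the value-coercion layer
--         # owns interpretation).
--         if ch == "\\" and pos + 1 < n:
--             out.append(raw[pos:pos + 2])
--             pos += 2
--             continue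
--         if ch == '"':
--             return pos + 1, "".join(out)
--         out.append(ch)
--         pos += 1
--     raise TokenizerError(
--         line_no,
--         f"unterminated {quote!r}-quoted scalar",
--     )
-- ===== SOURCE B (Python) =====
-- class TokenizerError(Exception):
--     def __init__(self, line: int, message: str) -> None:
--         super().__init__(f"line {line}: {message}")
--         self.line = line
--
--
-- def _read_quoted_scalar(raw, start, line_no):
--     # Chunked jump-scan: str.find jumps to the next special character and
--     # whole runs are appended as slices instead of one char per iteration.
--     quote = raw[start]
--     n = len(raw)
--     pos = start + 1
--     parts = []
--     if quote == "'":
--         while True: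
--             idx = raw.find("'", pos)
--             if idx == -1:
--                 break
--             parts.append(raw[pos:idx])
--             if idx + 1 < n and raw[idx + 1] == "'":
--                 parts.append("'")
--                 pos = idx + 2
--             else:
--                 return idx + 1, "".join(parts)
--     else:
--         while True:
--             bi = raw.find("\\", pos)
--             qi = raw.find('"', pos)
--             if bi != -1 and bi + 1 < n and (qi == -1 or bi < qi):
--                 parts.append(raw[pos:bi + 2])
--                 pos = bi + 2
--             elif qi != -1:
--                 parts.append(raw[pos:qi])
--                 return qi + 1, "".join(parts)
--             else:
--                 break
--     raise TokenizerError(line_no, f"unterminated {quote!r}-quoted scalar")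
-- ===== Notes on version B (the rewrite author's own statement) =====
-- stated objective: faster
-- what changed: Replaces A's one-character-per-iteration while-loop by a chunked jump-scan: str.find locates the next special character (quote or backslash) and whole intervening runs are appended as slices, so the per-character Python-level loop disappears.
-- outside the precondition, e.g. on _read_quoted_scalar("'a'", -3, 1): A returns (3, "a'a"), B returns (3, 'a'); on _read_quoted_scalar('"\'\'', -3, 1): A returns (1, "''"), B raises TokenizerError
import Mathlib
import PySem

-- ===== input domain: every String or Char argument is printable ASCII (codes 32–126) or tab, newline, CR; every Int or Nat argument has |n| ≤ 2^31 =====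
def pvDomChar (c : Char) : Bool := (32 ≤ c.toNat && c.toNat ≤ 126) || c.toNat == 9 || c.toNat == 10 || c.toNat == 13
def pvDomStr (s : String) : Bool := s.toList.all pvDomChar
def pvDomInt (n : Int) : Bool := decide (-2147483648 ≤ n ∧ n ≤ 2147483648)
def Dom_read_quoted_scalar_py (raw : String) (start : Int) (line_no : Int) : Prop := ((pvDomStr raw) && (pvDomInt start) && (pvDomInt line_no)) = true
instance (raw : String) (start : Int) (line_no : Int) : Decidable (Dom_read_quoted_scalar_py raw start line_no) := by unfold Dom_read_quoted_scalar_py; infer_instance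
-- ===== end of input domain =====

-- B replaces A's one-character-per-iteration scan by a chunked jump-scan (str.find to the
-- next special character, whole runs appended as slices); same return value on Pre_.
-- On the Python side A raises TokenizerError (unterminated scalar) / IndexError (start out
-- of range); both ports return (-1, "") there and Pre_ excludes those inputs.

-- ===== PORT A =====
-- A's while-loop over pos, one character at a time; `none` = the TokenizerError raise path.
-- The list argument is raw[pos:], pos is carried for the returned offset, out is A's list.
def goA (quote : Char) : List Char → Int → List Char → Option (Int × List Char)
  | [], _, _ => none
  | ch :: rest, pos, out =>
    if quote = '\'' then
      if ch = '\'' then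
        match rest with
        | '\'' :: rest2 => goA quote rest2 (pos + 2) (out ++ ['\''])
        | _ => some (pos + 1, out)
      else goA quote rest (pos + 1) (out ++ [ch])
    else
      if ch = '\\' then
        match rest with
        | c2 :: rest2 => goA quote rest2 (pos + 2) (out ++ ['\\', c2])
        | [] => goA quote [] (pos + 1) (out ++ [ch])
      else if ch = '"' then some (pos + 1, out)
      else goA quote rest (pos + 1) (out ++ [ch])
  termination_by l _ _ => l.length
  decreasing_by all_goals simp

def read_quoted_scalar_py (raw : String) (start : Int) (line_no : Int) : Int × String :=
  match PySem.Str.pyGet? raw start with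
  | none => (-1, "")                                   -- IndexError path (outside Pre_)
  | some quote =>
    match goA quote (raw.toList.drop (start + 1).toNat) (start + 1) [] with
    | some (p, out) => (p, String.ofList out)
    | none => (-1, "")                                 -- TokenizerError path (outside Pre_)

-- ===== PORT B =====
-- Source B's single-quote loop: raw.find("'", pos) becomes findIdx? on the suffix raw[pos:].
def goBs : List Char → Int → List Char → Option (Int × List Char)
  | rest, pos, acc =>
    match h : rest.findIdx? (· = '\'') with
    | none => none
    | some i =>
      match h2 : rest.drop (i + 1) with
      | '\'' :: rest2 => goBs rest2 (pos + (i : Int) + 2) (acc ++ rest.take i ++ ['\''])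
      | _ => some (pos + (i : Int) + 1, acc ++ rest.take i)
  termination_by rest _ _ => rest.length
  decreasing_by
    have hi := List.findIdx?_eq_some_iff_findIdx_eq.mp h
    have := congrArg List.length h2
    simp at this
    omega

-- Source B's double-quote loop: two finds, earliest special char decides the step.
def goBd : List Char → Int → List Char → Option (Int × List Char)
  | rest, pos, acc =>
    match hb : rest.findIdx? (· = '\\'), rest.findIdx? (· = '"') with
    | some b, qi =>
      if b + 1 < rest.length ∧ (∀ q, qi = some q → b < q) then
        goBd (rest.drop (b + 2)) (pos + (b : Int) + 2) (acc ++ rest.take (b + 2))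
      else
        match qi with
        | some q => some (pos + (q : Int) + 1, acc ++ rest.take q)
        | none => none
    | none, some q => some (pos + (q : Int) + 1, acc ++ rest.take q)
    | none, none => none
  termination_by rest _ _ => rest.length
  decreasing_by
    have hi := List.findIdx?_eq_some_iff_findIdx_eq.mp hb
    simp
    omega

def read_quoted_scalar_py_alt (raw : String) (start : Int) (line_no : Int) : Int × String :=
  match PySem.Str.pyGet? raw start with
  | none => (-1, "")
  | some quote =>
    match (if quote = '\'' then goBs (raw.toList.drop (start + 1).toNat) (start + 1) []
           else goBd (raw.toList.drop (start + 1).toNat) (start + 1) []) with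
    | some (p, out) => (p, String.ofList out)
    | none => (-1, "")

-- ===== PRECONDITION & SPEC =====
-- Closed termination conditions: after the opening quote, a single-quoted scalar is closed
-- iff some quote is not consumed by ''-pairing; a double-quoted one iff an unescaped " occurs.
def sqClosed : List Char → Bool
  | [] => false
  | '\'' :: '\'' :: rest => sqClosed rest
  | '\'' :: _ => true
  | _ :: rest => sqClosed rest

def dqClosed : List Char → Bool
  | [] => false
  | '\\' :: _ :: rest => dqClosed rest
  | '"' :: _ => true
  | _ :: rest => dqClosed rest

-- Pre_ excludes: (a) start out of [-1, len), where A raises IndexError or, for start ≤ -2,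
-- returns a value produced by Python's accidental negative-index wraparound (the scan reads
-- characters before the opening quote by wrapping past the string's end) while B's find-based
-- scan raises TokenizerError or returns a different accidental value; (b) unterminated
-- scalars, where A raises TokenizerError.  start = -1 behaves like a normal scan and is kept.
def Pre_read_quoted_scalar_py (raw : String) (start : Int) (line_no : Int) : Prop :=
  -1 ≤ start ∧ start < (raw.toList.length : Int) ∧
  ((match raw.toList.drop ((start + 1).toNat) with
    | rest => (if PySem.Str.pyGet? raw start = some '\'' then sqClosed rest else dqClosed rest)) = true)
instance (raw : String) (start : Int) (line_no : Int) : Decidable (Pre_read_quoted_scalar_py raw start line_no) := by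
  unfold Pre_read_quoted_scalar_py; infer_instance

def pvWitness_read_quoted_scalar_py : String × Int × Int := ("'ab''c' x", 0, 1)

def Spec_read_quoted_scalar_py (raw : String) (start : Int) (line_no : Int) (out : Int × String) : Prop := out = read_quoted_scalar_py_alt raw start line_no
instance (raw : String) (start : Int) (line_no : Int) (out : Int × String) : Decidable (Spec_read_quoted_scalar_py raw start line_no out) := by unfold Spec_read_quoted_scalar_py; infer_instance

-- ===== CLAIM (what is proved, stated in full; the proofs are below) =====
def Claim_equal_read_quoted_scalar_py : Prop := ∀ (raw : String) (start : Int) (line_no : Int), Dom_read_quoted_scalar_py raw start line_no → Pre_read_quoted_scalar_py raw start line_no → Spec_read_quoted_scalar_py raw start line_no (read_quoted_scalar_py raw start line_no)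

-- ===== LEMMAS AND PROOFS =====

lemma goBs_shift (ch : Char) (h : ¬ ch = '\'') (rest : List Char) (pos : Int) (acc : List Char) :
    goBs (ch :: rest) pos acc = goBs rest (pos + 1) (acc ++ [ch]) := by
  rw [goBs, goBs]
  have hcons : List.findIdx? (fun x => decide (x = '\'')) (ch :: rest)
      = (List.findIdx? (fun x => decide (x = '\'')) rest).map (· + 1) := by
    simp [List.findIdx?_cons, h]
  split
  · rename_i heq
    rw [hcons] at heq
    cases hf : List.findIdx? (fun x => decide (x = '\'')) rest with
    | some i => rw [hf] at heq; simp at heq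
    | none =>
      split
      · rfl
      · rename_i i1 heq3; simp at heq3
  · rename_i i' heq
    rw [hcons] at heq
    cases hf : List.findIdx? (fun x => decide (x = '\'')) rest with
    | none => rw [hf] at heq; simp at heq
    | some i =>
      rw [hf] at heq
      simp at heq
      subst heq
      have hd : List.drop (i + 1 + 1) (ch :: rest) = List.drop (i + 1) rest := by simp
      split
      · rename_i rest2 heq2
        rw [hd] at heq2
        split
        · rename_i heq3; simp at heq3
        · rename_i i1 heq3
          injection heq3 with hi1; subst hi1
          split
          · rename_i rest2' heq4
            rw [heq2] at heq4
            injection heq4 with _ hr; subst hr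
            congr 1
            · push_cast; ring
            · simp [List.take_succ_cons]
          · rename_i heq4
            exact absurd heq2 (by simpa using heq4 rest2)
      · rename_i heq2
        rw [hd] at heq2  -- wait heq2 is a ∀-statement; rw at may fail
        split
        · rename_i heq3; simp at heq3
        · rename_i i1 heq3
          injection heq3 with hi1; subst hi1
          split
          · rename_i rest2' heq4
            exact absurd heq4 (by simpa using heq2 rest2')
          · rename_i heq4
            congr 2
            · push_cast; ring
            · simp [List.take_succ_cons]

lemma goBs_head (rest : List Char) (pos : Int) (acc : List Char) :
    goBs ('\'' :: rest) pos acc =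
      match rest with
      | '\'' :: rest2 => goBs rest2 (pos + 2) (acc ++ ['\''])
      | _ => some (pos + 1, acc) := by
  rw [goBs]
  have hcons : List.findIdx? (fun x => decide (x = '\'')) ('\'' :: rest) = some 0 := by
    simp [List.findIdx?_cons]
  split
  · rename_i heq; rw [hcons] at heq; simp at heq
  · rename_i i heq
    rw [hcons] at heq
    injection heq with hi; subst hi
    split
    · rename_i rest2 heq2
      simp at heq2
      subst heq2
      simp
    · rename_i heq2
      have h2 : List.drop (0 + 1) ('\'' :: rest) = rest := by simp
      cases hr : rest with
      | nil => simp
      | cons c rest2 =>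
        by_cases hc : c = '\''
        · subst hc; subst hr
          exact absurd (by simpa using h2) (by simpa using heq2 rest2)
        · subst hr
          simp
          cases c
          simp_all

lemma goBs_eq_goA : ∀ (n : Nat) (rest : List Char), rest.length ≤ n →
    ∀ (pos : Int) (acc : List Char), goBs rest pos acc = goA '\'' rest pos acc := by
  intro n
  induction n with
  | zero =>
    intro rest hlen pos acc
    have : rest = [] := List.eq_nil_of_length_eq_zero (Nat.le_zero.mp hlen)
    subst this
    rw [goBs, goA.eq_def]
    simp
  | succ n ih =>
    intro rest hlen pos acc
    cases rest with
    | nil => rw [goBs, goA.eq_def]; simp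
    | cons ch rest' =>
      by_cases hch : ch = '\''
      · subst hch
        rw [goBs_head, goA.eq_def]
        simp only []
        cases rest' with
        | nil => simp
        | cons c rest2 =>
          by_cases hc : c = '\''
          · subst hc
            simp only []
            exact ih rest2 (by simp at hlen; omega) _ _
          · cases c; simp_all
      · rw [goBs_shift ch hch, goA.eq_def]
        simp only [hch]
        exact ih rest' (by simp at hlen; omega) _ _

lemma goBd_shift (ch : Char) (h1 : ¬ ch = '\\') (h2 : ¬ ch = '"') (rest : List Char) (pos : Int) (acc : List Char) :
    goBd (ch :: rest) pos acc = goBd rest (pos + 1) (acc ++ [ch]) := by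
  rw [goBd, goBd]
  have hb : List.findIdx? (fun x => decide (x = '\\')) (ch :: rest)
      = (List.findIdx? (fun x => decide (x = '\\')) rest).map (· + 1) := by
    simp [List.findIdx?_cons, h1]
  have hq : List.findIdx? (fun x => decide (x = '"')) (ch :: rest)
      = (List.findIdx? (fun x => decide (x = '"')) rest).map (· + 1) := by
    simp [List.findIdx?_cons, h2]
  cases hbf : List.findIdx? (fun x => decide (x = '\\')) rest <;>
    cases hqf : List.findIdx? (fun x => decide (x = '"')) rest <;>
      simp only [hq, hqf, Option.map_none, Option.map_some]
  case none.none =>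
    split
    · rename_i b heq; rw [hb, hbf] at heq; simp at heq
    · rename_i heq1 heq2; simp at heq2
    · rfl
  case none.some q0 =>
    split
    · rename_i b heq; rw [hb, hbf] at heq; simp at heq
    · rename_i q heq1 heq2
      injection heq2 with hq2; subst hq2
      simp [List.take_succ_cons]
      omega
    · rename_i heq1 heq2; simp at heq2
  case some.none b0 =>
    split
    · rename_i b heq
      rw [hb, hbf] at heq
      simp at heq; subst heq
      have hiff : (b0 + 1 + 1 < (ch :: rest).length ∧ ∀ (q : ℕ), (none : Option Nat) = some q → b0 + 1 < q) ↔
          (b0 + 1 < rest.length ∧ ∀ (q : ℕ), (none : Option Nat) = some q → b0 < q) := by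
        simp
      by_cases hC : b0 + 1 < rest.length ∧ ∀ (q : ℕ), (none : Option Nat) = some q → b0 < q
      · rw [if_pos (hiff.mpr hC), if_pos hC]
        congr 1
        · push_cast; ring
        · simp [List.take_succ_cons]
      · rw [if_neg (fun hh => hC (hiff.mp hh)), if_neg hC]
    · rename_i heq1 heq2; rw [hb, hbf] at heq1; simp at heq1
    · rename_i heq1 heq2; rw [hb, hbf] at heq1; simp at heq1
  case some.some b0 q0 =>
    split
    · rename_i b heq
      rw [hb, hbf] at heq
      simp at heq; subst heq
      have hiff : (b0 + 1 + 1 < (ch :: rest).length ∧ ∀ (q : ℕ), some (q0 + 1) = some q → b0 + 1 < q) ↔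
          (b0 + 1 < rest.length ∧ ∀ (q : ℕ), some q0 = some q → b0 < q) := by
        simp
      by_cases hC : b0 + 1 < rest.length ∧ ∀ (q : ℕ), some q0 = some q → b0 < q
      · rw [if_pos (hiff.mpr hC), if_pos hC]
        congr 1
        · push_cast; ring
        · simp [List.take_succ_cons]
      · rw [if_neg (fun hh => hC (hiff.mp hh)), if_neg hC]
        simp [List.take_succ_cons]
        omega
    · rename_i heq1 heq2; rw [hb, hbf] at heq1; simp at heq1
    · rename_i heq1 heq2; rw [hb, hbf] at heq1; simp at heq1

lemma goBd_head_bs (rest : List Char) (pos : Int) (acc : List Char) :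
    goBd ('\\' :: rest) pos acc =
      match rest with
      | c2 :: rest2 => goBd rest2 (pos + 2) (acc ++ ['\\', c2])
      | [] => none := by
  rw [goBd]
  have hb0 : List.findIdx? (fun x => decide (x = '\\')) ('\\' :: rest) = some 0 := by
    simp [List.findIdx?_cons]
  have hq : List.findIdx? (fun x => decide (x = '"')) ('\\' :: rest)
      = (List.findIdx? (fun x => decide (x = '"')) rest).map (· + 1) := by
    simp [List.findIdx?_cons]
  split
  · rename_i b heq
    rw [hb0] at heq; injection heq with hb; subst hb
    cases rest with
    | nil =>
      rw [if_neg (by simp)]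
      simp [hq]
    | cons c2 rest2 =>
      rw [if_pos ⟨by simp, by rw [hq]; intro q hq'; cases hf : List.findIdx? (fun x => decide (x = '"')) (c2 :: rest2) with
        | none => rw [hf] at hq'; simp at hq'
        | some j => rw [hf] at hq'; simp at hq'; omega⟩]
      simp
  · rename_i heq1 heq2; rw [hb0] at heq1; simp at heq1
  · rename_i heq1 heq2; rw [hb0] at heq1; simp at heq1

lemma goBd_head_q (rest : List Char) (pos : Int) (acc : List Char) :
    goBd ('"' :: rest) pos acc = some (pos + 1, acc) := by
  rw [goBd]
  have hq0 : List.findIdx? (fun x => decide (x = '"')) ('"' :: rest) = some 0 := by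
    simp [List.findIdx?_cons]
  split
  · rename_i b heq
    rw [if_neg (by rw [hq0]; rintro ⟨-, hall⟩; exact absurd (hall 0 rfl) (by omega))]
    rw [hq0]
    simp
  · rename_i q heq1 heq2
    rw [hq0] at heq2; injection heq2 with hqv; subst hqv
    simp
  · rename_i heq1 heq2; rw [hq0] at heq2; simp at heq2

lemma goA_nil (quote : Char) (pos : Int) (out : List Char) : goA quote [] pos out = none := by
  rw [goA.eq_def]

lemma goBd_eq_goA : ∀ (n : Nat) (rest : List Char), rest.length ≤ n →
    ∀ (quote : Char), ¬ quote = '\'' →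
    ∀ (pos : Int) (acc : List Char), goBd rest pos acc = goA quote rest pos acc := by
  intro n
  induction n with
  | zero =>
    intro rest hlen quote hquote pos acc
    have : rest = [] := List.eq_nil_of_length_eq_zero (Nat.le_zero.mp hlen)
    subst this
    rw [goBd, goA.eq_def]
    simp
  | succ n ih =>
    intro rest hlen quote hquote pos acc
    cases rest with
    | nil => rw [goBd, goA.eq_def]; simp
    | cons ch rest' =>
      by_cases hbs : ch = '\\'
      · subst hbs
        rw [goBd_head_bs]
        cases rest' with
        | nil =>
          rw [goA.eq_def]
          simp [hquote, goA_nil]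
        | cons c2 rest2 =>
          rw [goA.eq_def]
          simp only [if_neg hquote]
          exact ih rest2 (by simp at hlen; omega) quote hquote _ _
      · by_cases hqq : ch = '"'
        · subst hqq
          rw [goBd_head_q, goA.eq_def]
          simp [hquote, hbs]
        · rw [goBd_shift ch hbs hqq, goA.eq_def]
          simp only [if_neg hquote, if_neg hbs, if_neg hqq]
          exact ih rest' (by simp at hlen; omega) quote hquote _ _

-- ===== VERDICT (by name: the statement is the Claim_ definition above) =====
theorem read_quoted_scalar_py_spec : Claim_equal_read_quoted_scalar_py := by
  intro raw start line_no _ _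
  unfold Spec_read_quoted_scalar_py read_quoted_scalar_py read_quoted_scalar_py_alt
  cases hq : PySem.Str.pyGet? raw start with
  | none => rfl
  | some quote =>
    by_cases h : quote = '\''
    · subst h
      simp [goBs_eq_goA (raw.toList.drop (start + 1).toNat).length _ le_rfl]
    · simp [h, goBd_eq_goA (raw.toList.drop (start + 1).toNat).length _ le_rfl quote h]
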